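-- pv_equiv track=rewrite | github.com/lanlan47879/adventofcode2020 | day09/day09_part01.py | get_invalid_num
-- ===== SOURCE A (Python) =====
-- def is_valid_sum(num, preamble):
--     for i in preamble:
--         for j in preamble:
--             sum = i + j
--             if sum == num and i != j:
--                 return True
--
-- def get_invalid_num(entries, length):
--     j = length
--     for i in range(len(entries)):
--         next_num = entries[j]
--         preamble = get_preamble(entries, i, j)
--
--         if not is_valid_sum(next_num, preamble):
--             return next_num
--
--         if j + 1 < len(entries):
--             j += 1
--
-- def get_preamble(entries, start, end):
--     return entries[start:end]
-- ===== SOURCE B (Python) =====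
-- def get_invalid_num(entries, length):
--     n = len(entries)
--     for i in range(n):
--         j = min(length + i, n - 1)
--         num = entries[j]
--         window = set(entries[i:j])
--         if not any(num - x in window and num - x != x for x in window):
--             return num
--     return None
-- ===== Notes on version B (the rewrite author's own statement) =====
-- stated objective: faster
-- what changed: B replaces A's O(L^2) double loop over each preamble with a hash-set membership test (num - x in window, num - x != x) and replaces A's statefully incremented window end j by its closed form min(length+i, n-1).
import Mathlib
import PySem

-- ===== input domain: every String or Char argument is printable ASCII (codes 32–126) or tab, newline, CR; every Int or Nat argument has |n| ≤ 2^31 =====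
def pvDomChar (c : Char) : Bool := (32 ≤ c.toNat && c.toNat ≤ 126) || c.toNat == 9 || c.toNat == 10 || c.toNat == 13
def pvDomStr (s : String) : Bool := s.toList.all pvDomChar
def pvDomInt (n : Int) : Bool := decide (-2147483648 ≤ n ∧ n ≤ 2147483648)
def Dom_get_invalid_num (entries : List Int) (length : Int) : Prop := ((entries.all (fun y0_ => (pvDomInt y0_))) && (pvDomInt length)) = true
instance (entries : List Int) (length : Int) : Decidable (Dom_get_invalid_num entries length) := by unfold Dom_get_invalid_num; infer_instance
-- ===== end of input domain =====

-- B replaces A's quadratic two-sum scan per window by a hash-set membership test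
-- (num - x in window) and A's stateful j by its closed form min(length+i, n-1):
-- objective = faster (O(N·L) instead of O(N·L^2)). Equivalence is about return values only.

-- ===== PORT A =====
def is_valid_sum (num : Int) (preamble : List Int) : Bool :=
  preamble.any (fun i => preamble.any (fun j => i + j == num && i != j))

-- A's loop over range(len(entries)) with mutable j; k = iterations remaining
def pvGoA (entries : List Int) (k : Nat) (j : Int) : Option Int :=
  match k with
  | 0 => none
  | Nat.succ k' =>
    match PySem.List.pyGet? entries j with
    | none => none  -- IndexError (excluded by Pre_)
    | some next_num =>
      let i : Int := (entries.length : Int) - (k' + 1)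
      let preamble := PySem.List.slice entries (some i) (some j)
      if is_valid_sum next_num preamble then
        pvGoA entries k' (if j + 1 < (entries.length : Int) then j + 1 else j)
      else some next_num

def get_invalid_num (entries : List Int) (length : Int) : Option Int :=
  pvGoA entries entries.length length

-- ===== PORT B =====
def pvGoB (entries : List Int) (length : Int) (k : Nat) : Option Int :=
  match k with
  | 0 => none
  | Nat.succ k' =>
    let n : Int := entries.length
    let i : Int := n - (k' + 1)
    let j : Int := min (length + i) (n - 1)
    match PySem.List.pyGet? entries j with
    | none => none  -- IndexError (excluded by Pre_)
    | some num =>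
      let window : PySem.Set Int := PySem.Set.ofList (PySem.List.slice entries (some i) (some j))
      if window.any (fun x => PySem.Set.contains window (num - x) && num - x != x) then
        pvGoB entries length k'
      else some num

def get_invalid_num_alt (entries : List Int) (length : Int) : Option Int :=
  pvGoB entries length entries.length

-- ===== PRECONDITION & SPEC =====
-- Pre_ excludes exactly the inputs on which A raises IndexError at entries[j]:
-- nonempty entries with length outside [-len(entries), len(entries)).
def Pre_get_invalid_num (entries : List Int) (length : Int) : Prop :=
  entries = [] ∨ (-(entries.length : Int) ≤ length ∧ length < entries.length)
instance (entries : List Int) (length : Int) : Decidable (Pre_get_invalid_num entries length) := by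
  unfold Pre_get_invalid_num; infer_instance

def pvWitness_get_invalid_num : List Int × Int := ([35, 20, 15, 25, 47, 40, 62, 55, 65, 95], 5)

def Spec_get_invalid_num (entries : List Int) (length : Int) (out : Option Int) : Prop := out = get_invalid_num_alt entries length
instance (entries : List Int) (length : Int) (out : Option Int) : Decidable (Spec_get_invalid_num entries length out) := by unfold Spec_get_invalid_num; infer_instance

-- ===== CLAIM (what is proved, stated in full; the proofs are below) =====
def Claim_equal_get_invalid_num : Prop := ∀ (entries : List Int) (length : Int), Dom_get_invalid_num entries length → Pre_get_invalid_num entries length → Spec_get_invalid_num entries length (get_invalid_num entries length)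

-- ===== LEMMAS AND PROOFS =====

-- A window has a distinct-valued pair summing to num iff some x in the deduplicated
-- window has num - x also in it with num - x ≠ x.
lemma valid_sum_eq_set_check (num : Int) (w : List Int) :
    is_valid_sum num w
      = (PySem.Set.ofList w).any
          (fun x => PySem.Set.contains (PySem.Set.ofList w) (num - x) && num - x != x) := by
  rw [Bool.eq_iff_iff]
  simp only [is_valid_sum, List.any_eq_true, Bool.and_eq_true, beq_iff_eq,
    bne_iff_ne, PySem.Set.contains_eq_listContains, List.contains_eq_mem, decide_eq_true_eq,
    PySem.Set.mem_ofList]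
  constructor
  · rintro ⟨x, hx, y, hy, hsum, hne⟩
    refine ⟨x, hx, ?_, ?_⟩ <;> rw [show num - x = y by omega] <;> [exact hy; omega]
  · rintro ⟨x, hx, hy, hne⟩
    exact ⟨x, hx, num - x, hy, by omega, by omega⟩

lemma goA_eq_goB (entries : List Int) (length : Int)
    (h1 : -(entries.length : Int) ≤ length) (h2 : length < entries.length) :
    ∀ k, k ≤ entries.length →
      pvGoA entries k (min (length + ((entries.length : Int) - k)) ((entries.length : Int) - 1))
        = pvGoB entries length k := by
  intro k
  induction k with
  | zero => intro _; rfl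
  | succ k' ih =>
    intro hk
    have hcast : ((k' + 1 : Nat) : Int) = (k' : Int) + 1 := by push_cast; ring
    rw [pvGoA, pvGoB]
    simp only [hcast]
    have hrange : PySem.Raise.InRange entries.length
        (min (length + ((entries.length : Int) - ((k' : Int) + 1))) ((entries.length : Int) - 1)) := by
      constructor <;> omega
    obtain ⟨v, hv⟩ : ∃ v, PySem.List.pyGet? entries
        (min (length + ((entries.length : Int) - ((k' : Int) + 1))) ((entries.length : Int) - 1)) = some v := by
      rcases h : PySem.List.pyGet? entries _ with _ | v
      · exact absurd hrange (by rwa [← PySem.List.pyGet?_eq_none_iff])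
      · exact ⟨v, rfl⟩
    rw [hv]
    simp only [valid_sum_eq_set_check]
    split
    · have hnext : (if min (length + ((entries.length : Int) - ((k' : Int) + 1))) ((entries.length : Int) - 1) + 1 < (entries.length : Int)
            then min (length + ((entries.length : Int) - ((k' : Int) + 1))) ((entries.length : Int) - 1) + 1
            else min (length + ((entries.length : Int) - ((k' : Int) + 1))) ((entries.length : Int) - 1))
          = min (length + ((entries.length : Int) - (k' : Int))) ((entries.length : Int) - 1) := by
        split <;> omega
      rw [hnext]
      exact ih (by omega)
    · rfl

-- ===== VERDICT (by name: the statement is the Claim_ definition above) =====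
theorem get_invalid_num_spec : Claim_equal_get_invalid_num := by
  intro entries length _hdom hpre
  unfold Spec_get_invalid_num get_invalid_num get_invalid_num_alt
  rcases hpre with hnil | ⟨h1, h2⟩
  · subst hnil; rfl
  · have h0 : length = min (length + ((entries.length : Int) - entries.length)) ((entries.length : Int) - 1) := by omega
    rw [show pvGoA entries entries.length length
          = pvGoA entries entries.length (min (length + ((entries.length : Int) - entries.length)) ((entries.length : Int) - 1)) by rw [← h0]]
    exact goA_eq_goB entries length h1 h2 entries.length le_rfl
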